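-- pv_equiv track=rewrite | github.com/tira-io/tira | application/src/tira_app/endpoints/vm_api.py | __normalize_command
-- ===== SOURCE A (Python) =====
-- def __normalize_command(cmd: str, evaluator: str) -> str:
--     to_normalize = {
--         "inputRun": "/tira-data/input-run",
--         "outputDir": "/tira-data/output",
--         "inputDataset": "/tira-data/input",
--     }
--
--     if "inputRun" in cmd and evaluator:
--         to_normalize["outputDir"] = "/tira-data/eval_output"
--         to_normalize["inputDataset"] = "/tira-data/input_truth"
--
--     for k, v in to_normalize.items():
--         cmd = cmd.replace("$" + k, v).replace("${" + k + "}", v)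
--
--     return cmd
-- ===== SOURCE B (Python) =====
-- def __normalize_command(cmd: str, evaluator: str) -> str:
--     eval_mode = "inputRun" in cmd and bool(evaluator)
--     out_dir = "/tira-data/eval_output" if eval_mode else "/tira-data/output"
--     in_ds = "/tira-data/input_truth" if eval_mode else "/tira-data/input"
--     subs = [
--         ("$inputRun", "/tira-data/input-run"),
--         ("${inputRun}", "/tira-data/input-run"),
--         ("$outputDir", out_dir),
--         ("${outputDir}", out_dir),
--         ("$inputDataset", in_ds),
--         ("${inputDataset}", in_ds),
--     ]
--     parts = []
--     i = 0
--     n = len(cmd)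
--     while i < n:
--         for pat, val in subs:
--             if cmd.startswith(pat, i):
--                 parts.append(val)
--                 i += len(pat)
--                 break
--         else:
--             parts.append(cmd[i])
--             i += 1
--     return "".join(parts)
-- ===== Notes on version B (the rewrite author's own statement) =====
-- stated objective: alternative
-- what changed: Replaces six sequential full-string str.replace passes by a single left-to-right scan over cmd against a precomputed substitution table (first matching placeholder wins), joining the pieces once.
import Mathlib
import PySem

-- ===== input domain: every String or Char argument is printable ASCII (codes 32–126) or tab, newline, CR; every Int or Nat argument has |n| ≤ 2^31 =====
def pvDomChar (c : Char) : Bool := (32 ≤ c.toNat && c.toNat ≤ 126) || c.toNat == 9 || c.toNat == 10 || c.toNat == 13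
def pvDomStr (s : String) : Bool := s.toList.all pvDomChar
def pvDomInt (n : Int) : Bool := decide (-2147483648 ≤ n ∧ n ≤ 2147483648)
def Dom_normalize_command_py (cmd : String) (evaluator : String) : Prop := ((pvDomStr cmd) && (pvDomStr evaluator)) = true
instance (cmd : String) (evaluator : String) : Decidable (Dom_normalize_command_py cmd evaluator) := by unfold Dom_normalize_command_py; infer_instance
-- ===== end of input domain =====

-- B replaces A's six sequential full-string str.replace passes by one left-to-right scan
-- against a substitution table (first matching placeholder wins); same return value, proved below.

-- ===== PORT A =====
-- literal transliteration of __normalize_command: build the dict (with the conditional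
-- overwrites), then fold its items, doing cmd.replace("$"+k, v).replace("${"+k+"}", v) each.
def normalize_command_py (cmd : String) (evaluator : String) : String :=
  let to_normalize : PySem.Dict String String :=
    ((PySem.Dict.empty.insert "inputRun" "/tira-data/input-run").insert
        "outputDir" "/tira-data/output").insert "inputDataset" "/tira-data/input"
  let to_normalize :=
    if PySem.Str.isIn "inputRun" cmd && !(evaluator == "") then
      (to_normalize.insert "outputDir" "/tira-data/eval_output").insert
        "inputDataset" "/tira-data/input_truth"
    else to_normalize
  to_normalize.items.foldl
    (fun c kv =>
      PySem.Str.replace (PySem.Str.replace c ("$" ++ kv.1) kv.2) ("${" ++ kv.1 ++ "}") kv.2)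
    cmd

-- ===== PORT B =====
-- Source B's while-loop: at index i try each (pattern, value) in order; on a match emit the value
-- and jump past the pattern, else copy one character.  fuel = remaining loop bound (n - i).
def pvScanGo (subs : List (List Char × List Char)) : Nat → List Char → List Char
  | _, [] => []
  | 0, _ :: _ => []      -- unreachable when fuel ≥ length: the loop bound never runs out early
  | fuel + 1, c :: t =>
    match subs.find? (fun pv => pv.1.isPrefixOf (c :: t)) with
    | some (p, v) => v ++ pvScanGo subs fuel (t.drop (p.length - 1))
    | none => c :: pvScanGo subs fuel t

def normalize_command_py_alt (cmd : String) (evaluator : String) : String :=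
  let evalMode := PySem.Str.isIn "inputRun" cmd && !(evaluator == "")
  let outDir : String := if evalMode then "/tira-data/eval_output" else "/tira-data/output"
  let inDs : String := if evalMode then "/tira-data/input_truth" else "/tira-data/input"
  let subs : List (List Char × List Char) :=
    [("$inputRun".toList, "/tira-data/input-run".toList),
     ("${inputRun}".toList, "/tira-data/input-run".toList),
     ("$outputDir".toList, outDir.toList),
     ("${outputDir}".toList, outDir.toList),
     ("$inputDataset".toList, inDs.toList),
     ("${inputDataset}".toList, inDs.toList)]
  String.ofList (pvScanGo subs cmd.toList.length cmd.toList)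

-- ===== PRECONDITION & SPEC =====
def Spec_normalize_command_py (cmd : String) (evaluator : String) (out : String) : Prop := out = normalize_command_py_alt cmd evaluator
instance (cmd : String) (evaluator : String) (out : String) : Decidable (Spec_normalize_command_py cmd evaluator out) := by unfold Spec_normalize_command_py; infer_instance

-- ===== CLAIM (what is proved, stated in full; the proofs are below) =====
def Claim_equal_normalize_command_py : Prop := ∀ (cmd : String) (evaluator : String), Dom_normalize_command_py cmd evaluator → Spec_normalize_command_py cmd evaluator (normalize_command_py cmd evaluator)

-- ===== LEMMAS AND PROOFS =====

def pvRep (old new : List Char) : List Char → List Char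
  | [] => []
  | c :: t =>
    if old.isPrefixOf (c :: t) then new ++ pvRep old new (t.drop (old.length - 1))
    else c :: pvRep old new t
termination_by s => s.length
decreasing_by all_goals simp

lemma pvScanGo_nil_toks : ∀ (f : Nat) (s : List Char), s.length ≤ f → pvScanGo [] f s = s := by
  intro f
  induction f with
  | zero => intro s hs; cases s with
    | nil => rfl
    | cons c t => simp at hs
  | succ f ih => intro s hs; cases s with
    | nil => rfl
    | cons c t =>
      simp only [pvScanGo, List.find?_nil]
      rw [ih t (by simpa using hs)]

lemma pvRep_clean_append (p v : List Char) (hp : p.head? = some '$') :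
    ∀ u x, (∀ c ∈ u, c ≠ '$') → pvRep p v (u ++ x) = u ++ pvRep p v x := by
  intro u
  induction u with
  | nil => intro x _; rfl
  | cons d u' ih =>
    intro x hu
    obtain ⟨pt, rfl⟩ : ∃ pt, p = '$' :: pt := by
      cases p with
      | nil => simp at hp
      | cons a b => simp at hp; exact ⟨b, by rw [hp]⟩
    have hd : d ≠ '$' := hu d (by simp)
    rw [List.cons_append, pvRep]
    have : (('$' :: pt).isPrefixOf (d :: (u' ++ x))) = false := by
      simp [List.isPrefixOf, Ne.symm hd]
    rw [this]
    simp only [Bool.false_eq_true, if_false]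
    rw [ih x (fun c hc => hu c (by simp [hc]))]; simp

def pvTokOK (pv : List Char × List Char) : Bool :=
  (pv.1.head? == some '$') && pv.1.tail.all (fun c => !(c == '$') && !(c == '/')) &&
  (pv.2.head? == some '/') && pv.2.all (fun c => !(c == '$'))

lemma pvTok_parts {p v : List Char} (h : pvTokOK (p, v) = true) :
    p.head? = some '$' ∧ (∀ c ∈ p.tail, c ≠ '$' ∧ c ≠ '/') ∧ v.head? = some '/' ∧
      (∀ c ∈ v, c ≠ '$') := by
  simp only [pvTokOK, Bool.and_eq_true, beq_iff_eq, List.all_eq_true, Bool.not_eq_true',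
    beq_eq_false_iff_ne] at h
  exact ⟨h.1.1.1, fun c hc => (h.1.1.2 c hc), h.1.2, h.2⟩

lemma pvScanGo_fuel (ts : List (List Char × List Char)) :
    ∀ f g s, s.length ≤ f → s.length ≤ g → pvScanGo ts f s = pvScanGo ts g s := by
  intro f
  induction f using Nat.strong_induction_on with | _ f ih =>
  intro g s hf hg
  cases s with
  | nil => cases f <;> cases g <;> rfl
  | cons c t =>
    cases f with
    | zero => simp at hf
    | succ f' =>
      cases g with
      | zero => simp at hg
      | succ g' =>
        cases h : ts.find? (fun pv => pv.1.isPrefixOf (c :: t)) with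
        | none =>
          simp only [pvScanGo, h]
          rw [ih f' (by omega) g' t (by simpa using hf) (by simpa using hg)]
        | some pv =>
          obtain ⟨p, v⟩ := pv
          simp only [pvScanGo, h]
          have hlen : (t.drop (p.length - 1)).length ≤ f' ∧ (t.drop (p.length - 1)).length ≤ g' := by
            constructor <;> (simp only [List.length_drop]; simp at hf hg; omega)
          rw [ih f' (by omega) g' _ hlen.1 hlen.2]

lemma pvFind_none_of_head (ts : List (List Char × List Char))
    (hts : ∀ pv ∈ ts, pvTokOK pv = true) {d : Char} (hd : d ≠ '$') (r : List Char) :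
    ts.find? (fun pv => pv.1.isPrefixOf (d :: r)) = none := by
  rw [List.find?_eq_none]
  intro pv hpv
  obtain ⟨pt, hp⟩ : ∃ pt, pv.1 = '$' :: pt := by
    have h1 := (pvTok_parts (p := pv.1) (v := pv.2) (by simpa using hts pv hpv)).1
    cases hpv1 : pv.1 with
    | nil => rw [hpv1] at h1; simp at h1
    | cons a b => rw [hpv1] at h1; simp at h1; exact ⟨b, by rw [h1]⟩
  rw [hp]
  simp [List.isPrefixOf, Ne.symm hd]

lemma pvScanGo_clean_append (ts : List (List Char × List Char))
    (hts : ∀ pv ∈ ts, pvTokOK pv = true) :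
    ∀ u f r, (∀ c ∈ u, c ≠ '$') → (u ++ r).length ≤ f →
      pvScanGo ts f (u ++ r) = u ++ pvScanGo ts (f - u.length) r := by
  intro u
  induction u with
  | nil => intro f r _ _; simp
  | cons d u' ih =>
    intro f r hu hf
    cases f with
    | zero => simp at hf
    | succ f' =>
      rw [List.cons_append]
      simp only [pvScanGo, pvFind_none_of_head ts hts (hu d (by simp)) (u' ++ r)]
      rw [ih f' r (fun c hc => hu c (by simp [hc])) (by simpa using hf)]
      simp [Nat.succ_sub_succ]

lemma pvScanGo_prefix (ts : List (List Char × List Char))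
    (hts : ∀ pv ∈ ts, pvTokOK pv = true) :
    ∀ f s u, s.length ≤ f → (∀ c ∈ u, c ≠ '$' ∧ c ≠ '/') →
      u <+: pvScanGo ts f s → u <+: s := by
  intro f
  induction f using Nat.strong_induction_on with | _ f ih =>
  intro s u hf hu hpre
  cases s with
  | nil =>
    cases f <;> (simp only [pvScanGo] at hpre; simpa using hpre)
  | cons c t =>
    cases f with
    | zero => simp at hf
    | succ f' =>
      cases h : ts.find? (fun pv => pv.1.isPrefixOf (c :: t)) with
      | none =>
        rw [pvScanGo] at hpre
        rw [h] at hpre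
        cases u with
        | nil => exact List.nil_prefix
        | cons d u' =>
          simp only at hpre
          obtain ⟨hd, hpre'⟩ := List.cons_prefix_cons.mp hpre
          subst hd
          have := ih f' (by omega) t u' (by simpa using hf)
            (fun c hc => hu c (by simp [hc])) hpre'
          exact List.cons_prefix_cons.mpr ⟨rfl, this⟩
      | some pv =>
        obtain ⟨p, v⟩ := pv
        rw [pvScanGo] at hpre
        rw [h] at hpre
        cases u with
        | nil => exact List.nil_prefix
        | cons d u' =>
          have hmem := List.mem_of_find?_eq_some h
          have hv := (pvTok_parts (p := p) (v := v) (hts _ hmem)).2.2.1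
          obtain ⟨vt, hvv⟩ : ∃ vt, v = '/' :: vt := by
            cases hv2 : v with
            | nil => rw [hv2] at hv; simp at hv
            | cons a b => rw [hv2] at hv; simp at hv; exact ⟨b, by rw [hv]⟩
          rw [hvv] at hpre
          simp only [List.cons_append] at hpre
          obtain ⟨hd, -⟩ := List.cons_prefix_cons.mp hpre
          exact absurd hd (hu d (by simp)).2

lemma pvStep (ts : List (List Char × List Char)) (p v : List Char)
    (hts : ∀ pv ∈ ts, pvTokOK pv = true) (hpv : pvTokOK (p, v) = true) :
    ∀ f s, s.length ≤ f →
      pvRep p v (pvScanGo ts f s) = pvScanGo (ts ++ [(p, v)]) f s := by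
  obtain ⟨hp, hptail, hvh, hvclean⟩ := pvTok_parts hpv
  obtain ⟨pt, rfl⟩ : ∃ pt, p = '$' :: pt := by
    cases hp2 : p with
    | nil => rw [hp2] at hp; simp at hp
    | cons a b => rw [hp2] at hp; simp at hp; exact ⟨b, by rw [hp]⟩
  simp only [List.tail_cons] at hptail
  have hts' : ∀ pv ∈ ts ++ [('$' :: pt, v)], pvTokOK pv = true := by
    intro pv hpv'
    rcases List.mem_append.mp hpv' with h | h
    · exact hts pv h
    · simp at h; rw [h]; exact hpv
  intro f
  induction f using Nat.strong_induction_on with | _ f ih =>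
  intro s hf
  cases s with
  | nil =>
    cases f <;> (simp only [pvScanGo]; rw [pvRep])
  | cons c t =>
    cases f with
    | zero => simp at hf
    | succ f' =>
      have htlen : t.length ≤ f' := by simpa using hf
      cases hfind : ts.find? (fun pv => pv.1.isPrefixOf (c :: t)) with
      | some pv0 =>
        obtain ⟨pi, vi⟩ := pv0
        have hmem := List.mem_of_find?_eq_some hfind
        have hviclean := (pvTok_parts (p := pi) (v := vi) (hts _ hmem)).2.2.2
        have hrlen : (t.drop (pi.length - 1)).length ≤ f' := by
          simp only [List.length_drop]; omega
        simp only [pvScanGo, hfind, List.find?_append, Option.some_or]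
        rw [pvRep_clean_append _ v (by simp) _ _ hviclean]
        rw [ih f' (by omega) _ hrlen]
      | none =>
        cases hmatch : ('$' :: pt).isPrefixOf (c :: t) with
        | true =>
          have hpre : ('$' :: pt) <+: (c :: t) := List.isPrefixOf_iff_prefix.mp hmatch
          obtain ⟨hc, hpt⟩ := List.cons_prefix_cons.mp hpre
          subst hc
          obtain ⟨r, rfl⟩ := hpt
          have hrlen : r.length ≤ f' - pt.length := by
            simp at htlen; omega
          -- RHS
          have hRHS : pvScanGo (ts ++ [('$' :: pt, v)]) (f' + 1) ('$' :: (pt ++ r)) =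
              v ++ pvScanGo (ts ++ [('$' :: pt, v)]) f' r := by
            simp only [pvScanGo, List.find?_append, hfind, Option.none_or, List.find?_cons,
              hmatch]
            simp [List.drop_left']
          rw [hRHS]
          -- LHS
          have hLHS : pvScanGo ts (f' + 1) ('$' :: (pt ++ r)) =
              '$' :: (pt ++ pvScanGo ts (f' - pt.length) r) := by
            simp only [pvScanGo, hfind]
            rw [pvScanGo_clean_append ts hts pt f' r (fun c hc => (hptail c hc).1) htlen]
          rw [hLHS]
          rw [pvRep]
          have hpref : ('$' :: pt).isPrefixOf
              ('$' :: (pt ++ pvScanGo ts (f' - pt.length) r)) = true := by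
            simp [List.isPrefixOf_iff_prefix, List.prefix_append]
          rw [hpref]
          simp only [if_true, List.length_cons, Nat.add_sub_cancel, List.drop_left']
          rw [ih (f' - pt.length) (by omega) r hrlen]
          rw [pvScanGo_fuel _ (f' - pt.length) f' r hrlen (by omega)]
        | false =>
          have hRHS : pvScanGo (ts ++ [('$' :: pt, v)]) (f' + 1) (c :: t) =
              c :: pvScanGo (ts ++ [('$' :: pt, v)]) f' t := by
            simp only [pvScanGo, List.find?_append, hfind, Option.none_or, List.find?_cons,
              hmatch, List.find?_nil]
          rw [hRHS]
          have hLHS : pvScanGo ts (f' + 1) (c :: t) = c :: pvScanGo ts f' t := by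
            simp only [pvScanGo, hfind]
          rw [hLHS]
          rw [pvRep]
          have hnp : ('$' :: pt).isPrefixOf (c :: pvScanGo ts f' t) = false := by
            by_cases hc : c = '$'
            · subst hc
              cases hq : ('$' :: pt).isPrefixOf ('$' :: pvScanGo ts f' t) with
              | false => rfl
              | true =>
                exfalso
                have hq' := List.cons_prefix_cons.mp (List.isPrefixOf_iff_prefix.mp hq)
                have := pvScanGo_prefix ts hts f' t pt htlen hptail hq'.2
                have : ('$' :: pt) <+: ('$' :: t) := List.cons_prefix_cons.mpr ⟨rfl, this⟩
                rw [← List.isPrefixOf_iff_prefix] at this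
                rw [this] at hmatch
                exact Bool.true_eq_false.mp hmatch
            · simp [List.isPrefixOf, Ne.symm hc]
          rw [hnp]
          simp only [Bool.false_eq_true, if_false]
          rw [ih f' (by omega) t htlen]

lemma pvRep_go_eq (old new : List Char) (hold : old ≠ []) :
    ∀ fuel l acc, l.length ≤ fuel →
      PySem.Chars.replace.go old new fuel l acc = acc.reverse ++ pvRep old new l := by
  intro fuel
  induction fuel with
  | zero =>
    intro l acc hl
    have : l = [] := by cases l; rfl; simp at hl
    subst this
    rw [PySem.Chars.replace.go, pvRep]
  | succ f ih =>
    intro l acc hl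
    cases l with
    | nil =>
      rw [PySem.Chars.replace.go, pvRep]
      all_goals simp
    | cons c t =>
      rw [PySem.Chars.replace.go]
      obtain ⟨o0, ot, rfl⟩ : ∃ o0 ot, old = o0 :: ot := by
        cases old with
        | nil => exact absurd rfl hold
        | cons a b => exact ⟨a, b, rfl⟩
      cases hp : (o0 :: ot).isPrefixOf (c :: t) with
      | true =>
        simp only [if_true]
        have hdrop : List.drop (o0 :: ot).length (c :: t) = t.drop ((o0 :: ot).length - 1) := by
          simp
        rw [hdrop]
        rw [ih _ (new.reverse ++ acc) (by simp only [List.length_drop]; simp at hl ⊢; omega)]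
        rw [pvRep, hp]
        simp
      | false =>
        simp only [Bool.false_eq_true, if_false]
        rw [ih t (c :: acc) (by simpa using hl)]
        rw [pvRep, hp]
        simp

lemma pvChars_replace_eq (old new s : List Char) (hold : old ≠ []) :
    PySem.Chars.replace s old new = pvRep old new s := by
  unfold PySem.Chars.replace
  rw [if_neg (by simpa [List.isEmpty_iff] using hold)]
  rw [pvRep_go_eq old new hold s.length s [] le_rfl]
  simp

lemma pvChain6 (p1 v1 p2 v2 p3 v3 p4 v4 p5 v5 p6 v6 : List Char)
    (h : ([(p1,v1),(p2,v2),(p3,v3),(p4,v4),(p5,v5),(p6,v6)]).all pvTokOK = true)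
    (s : List Char) :
    pvRep p6 v6 (pvRep p5 v5 (pvRep p4 v4 (pvRep p3 v3 (pvRep p2 v2 (pvRep p1 v1 s))))) =
      pvScanGo [(p1,v1),(p2,v2),(p3,v3),(p4,v4),(p5,v5),(p6,v6)] s.length s := by
  simp only [List.all_cons, List.all_nil, Bool.and_eq_true, and_true] at h
  obtain ⟨h1, h2, h3, h4, h5, h6⟩ := h
  have m1 : ∀ pv ∈ [(p1,v1)], pvTokOK pv = true := by
    intro pv hm; simp only [List.mem_singleton] at hm; rw [hm]; exact h1
  have m2 : ∀ pv ∈ [(p1,v1),(p2,v2)], pvTokOK pv = true := by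
    intro pv hm; simp only [List.mem_cons, List.not_mem_nil, or_false] at hm
    rcases hm with rfl | rfl <;> assumption
  have m3 : ∀ pv ∈ [(p1,v1),(p2,v2),(p3,v3)], pvTokOK pv = true := by
    intro pv hm; simp only [List.mem_cons, List.not_mem_nil, or_false] at hm
    rcases hm with rfl | rfl | rfl <;> assumption
  have m4 : ∀ pv ∈ [(p1,v1),(p2,v2),(p3,v3),(p4,v4)], pvTokOK pv = true := by
    intro pv hm; simp only [List.mem_cons, List.not_mem_nil, or_false] at hm
    rcases hm with rfl | rfl | rfl | rfl <;> assumption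
  have m5 : ∀ pv ∈ [(p1,v1),(p2,v2),(p3,v3),(p4,v4),(p5,v5)], pvTokOK pv = true := by
    intro pv hm; simp only [List.mem_cons, List.not_mem_nil, or_false] at hm
    rcases hm with rfl | rfl | rfl | rfl | rfl <;> assumption
  have c1 : pvRep p1 v1 s = pvScanGo [(p1,v1)] s.length s := by
    have e := pvStep [] p1 v1 (by simp) h1 s.length s le_rfl
    rw [pvScanGo_nil_toks _ _ le_rfl] at e
    simpa using e
  have c2 : pvRep p2 v2 (pvScanGo [(p1,v1)] s.length s) =
      pvScanGo [(p1,v1),(p2,v2)] s.length s := by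
    simpa using pvStep [(p1,v1)] p2 v2 m1 h2 s.length s le_rfl
  have c3 : pvRep p3 v3 (pvScanGo [(p1,v1),(p2,v2)] s.length s) =
      pvScanGo [(p1,v1),(p2,v2),(p3,v3)] s.length s := by
    simpa using pvStep [(p1,v1),(p2,v2)] p3 v3 m2 h3 s.length s le_rfl
  have c4 : pvRep p4 v4 (pvScanGo [(p1,v1),(p2,v2),(p3,v3)] s.length s) =
      pvScanGo [(p1,v1),(p2,v2),(p3,v3),(p4,v4)] s.length s := by
    simpa using pvStep [(p1,v1),(p2,v2),(p3,v3)] p4 v4 m3 h4 s.length s le_rfl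
  have c5 : pvRep p5 v5 (pvScanGo [(p1,v1),(p2,v2),(p3,v3),(p4,v4)] s.length s) =
      pvScanGo [(p1,v1),(p2,v2),(p3,v3),(p4,v4),(p5,v5)] s.length s := by
    simpa using pvStep [(p1,v1),(p2,v2),(p3,v3),(p4,v4)] p5 v5 m4 h5 s.length s le_rfl
  have c6 : pvRep p6 v6 (pvScanGo [(p1,v1),(p2,v2),(p3,v3),(p4,v4),(p5,v5)] s.length s) =
      pvScanGo [(p1,v1),(p2,v2),(p3,v3),(p4,v4),(p5,v5),(p6,v6)] s.length s := by
    simpa using pvStep [(p1,v1),(p2,v2),(p3,v3),(p4,v4),(p5,v5)] p6 v6 m5 h6 s.length s le_rfl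
  rw [c1, c2, c3, c4, c5, c6]

lemma pvStringEq {X : String} {l : List Char} (h : X.toList = l) : X = String.ofList l := by
  rw [← h, String.ofList_toList]

lemma pvBranchFalse (s : List Char) :
    PySem.Chars.replace (PySem.Chars.replace (PySem.Chars.replace (PySem.Chars.replace
      (PySem.Chars.replace (PySem.Chars.replace s
        ("$" ++ "inputRun" : String).toList "/tira-data/input-run".toList)
        ("${" ++ "inputRun" ++ "}" : String).toList "/tira-data/input-run".toList)
        ("$" ++ "outputDir" : String).toList "/tira-data/output".toList)
        ("${" ++ "outputDir" ++ "}" : String).toList "/tira-data/output".toList)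
        ("$" ++ "inputDataset" : String).toList "/tira-data/input".toList)
        ("${" ++ "inputDataset" ++ "}" : String).toList "/tira-data/input".toList =
    pvScanGo [("$inputRun".toList, "/tira-data/input-run".toList),
      ("${inputRun}".toList, "/tira-data/input-run".toList),
      ("$outputDir".toList, "/tira-data/output".toList),
      ("${outputDir}".toList, "/tira-data/output".toList),
      ("$inputDataset".toList, "/tira-data/input".toList),
      ("${inputDataset}".toList, "/tira-data/input".toList)] s.length s := by
  rw [pvChars_replace_eq _ _ _ (by decide), pvChars_replace_eq _ _ _ (by decide),
    pvChars_replace_eq _ _ _ (by decide), pvChars_replace_eq _ _ _ (by decide),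
    pvChars_replace_eq _ _ _ (by decide), pvChars_replace_eq _ _ _ (by decide)]
  rw [show ("$" ++ "inputRun" : String) = "$inputRun" from rfl,
    show ("${" ++ "inputRun" ++ "}" : String) = "${inputRun}" from rfl,
    show ("$" ++ "outputDir" : String) = "$outputDir" from rfl,
    show ("${" ++ "outputDir" ++ "}" : String) = "${outputDir}" from rfl,
    show ("$" ++ "inputDataset" : String) = "$inputDataset" from rfl,
    show ("${" ++ "inputDataset" ++ "}" : String) = "${inputDataset}" from rfl]
  exact pvChain6 _ _ _ _ _ _ _ _ _ _ _ _ (by decide) s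

lemma pvBranchTrue (s : List Char) :
    PySem.Chars.replace (PySem.Chars.replace (PySem.Chars.replace (PySem.Chars.replace
      (PySem.Chars.replace (PySem.Chars.replace s
        ("$" ++ "inputRun" : String).toList "/tira-data/input-run".toList)
        ("${" ++ "inputRun" ++ "}" : String).toList "/tira-data/input-run".toList)
        ("$" ++ "outputDir" : String).toList "/tira-data/eval_output".toList)
        ("${" ++ "outputDir" ++ "}" : String).toList "/tira-data/eval_output".toList)
        ("$" ++ "inputDataset" : String).toList "/tira-data/input_truth".toList)
        ("${" ++ "inputDataset" ++ "}" : String).toList "/tira-data/input_truth".toList =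
    pvScanGo [("$inputRun".toList, "/tira-data/input-run".toList),
      ("${inputRun}".toList, "/tira-data/input-run".toList),
      ("$outputDir".toList, "/tira-data/eval_output".toList),
      ("${outputDir}".toList, "/tira-data/eval_output".toList),
      ("$inputDataset".toList, "/tira-data/input_truth".toList),
      ("${inputDataset}".toList, "/tira-data/input_truth".toList)] s.length s := by
  rw [pvChars_replace_eq _ _ _ (by decide), pvChars_replace_eq _ _ _ (by decide),
    pvChars_replace_eq _ _ _ (by decide), pvChars_replace_eq _ _ _ (by decide),
    pvChars_replace_eq _ _ _ (by decide), pvChars_replace_eq _ _ _ (by decide)]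
  rw [show ("$" ++ "inputRun" : String) = "$inputRun" from rfl,
    show ("${" ++ "inputRun" ++ "}" : String) = "${inputRun}" from rfl,
    show ("$" ++ "outputDir" : String) = "$outputDir" from rfl,
    show ("${" ++ "outputDir" ++ "}" : String) = "${outputDir}" from rfl,
    show ("$" ++ "inputDataset" : String) = "$inputDataset" from rfl,
    show ("${" ++ "inputDataset" ++ "}" : String) = "${inputDataset}" from rfl]
  exact pvChain6 _ _ _ _ _ _ _ _ _ _ _ _ (by decide) s

lemma pvItemsFalse :
    (((PySem.Dict.empty.insert "inputRun" "/tira-data/input-run").insert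
        "outputDir" "/tira-data/output").insert "inputDataset" "/tira-data/input").items =
      [("inputRun", "/tira-data/input-run"), ("outputDir", "/tira-data/output"),
       ("inputDataset", "/tira-data/input")] := by
  simp [PySem.Dict.items_insert, PySem.Dict.contains_insert, PySem.Dict.empty]

lemma pvItemsTrue :
    (((((PySem.Dict.empty.insert "inputRun" "/tira-data/input-run").insert
        "outputDir" "/tira-data/output").insert "inputDataset" "/tira-data/input").insert
        "outputDir" "/tira-data/eval_output").insert "inputDataset" "/tira-data/input_truth").items =
      [("inputRun", "/tira-data/input-run"), ("outputDir", "/tira-data/eval_output"),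
       ("inputDataset", "/tira-data/input_truth")] := by
  simp [PySem.Dict.items_insert, PySem.Dict.contains_insert, PySem.Dict.empty]

-- ===== VERDICT (by name: the statement is the Claim_ definition above) =====
theorem normalize_command_py_spec : Claim_equal_normalize_command_py := by
  intro cmd evaluator _
  unfold Spec_normalize_command_py normalize_command_py normalize_command_py_alt
  cases hb : PySem.Str.isIn "inputRun" cmd && !(evaluator == "") with
  | false =>
    simp only [Bool.false_eq_true, if_false]
    rw [pvItemsFalse]
    simp only [List.foldl_cons, List.foldl_nil]
    apply pvStringEq
    simp only [PySem.Str.toList_replace]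
    exact pvBranchFalse cmd.toList
  | true =>
    simp only [if_true]
    rw [pvItemsTrue]
    simp only [List.foldl_cons, List.foldl_nil]
    apply pvStringEq
    simp only [PySem.Str.toList_replace]
    exact pvBranchTrue cmd.toList
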